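-- pv_equiv track=rewrite | github.com/ShouSawa/AI-Code-Maintainability | src/trash/added_file_output.py | is_ai_commit
-- ===== SOURCE A (Python) =====
-- def is_ai_commit(author, committer, message):
--     """
--     コミットがAIによるものかを判断する関数
--     """
--     ai_indicators = [
--         'bot', 'ai', 'copilot', 'assistant', 'github-actions',
--         'dependabot', 'renovate', 'automated', 'auto-'
--     ]
--
--     # author, committer, messageを小文字にして判定
--     author_lower = str(author).lower() if author else ''
--     committer_lower = str(committer).lower() if committer else ''
--     message_lower = str(message).lower() if message else ''
--
--     # AIの指標がいずれかに含まれているかチェック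
--     for indicator in ai_indicators:
--         if (indicator in author_lower or
--             indicator in committer_lower or
--             indicator in message_lower):
--             return True
--
--     return False
-- ===== SOURCE B (Python) =====
-- def is_ai_commit(author, committer, message):
--     """
--     コミットがAIによるものかを判断する関数
--     """
--     ai_indicators = {
--         'bot', 'ai', 'copilot', 'assistant', 'github-actions',
--         'dependabot', 'renovate', 'automated', 'auto-'
--     }
--     window_lengths = sorted({len(ind) for ind in ai_indicators})
--
--     # Sliding-window multi-pattern matcher: one pass over each lowered field,
--     # testing the window at each position (one per distinct indicator length)
--     # for membership in the indicator set, instead of one substring scan per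
--     # indicator.  A window equals an indicator iff that indicator occurs at
--     # that position, so the result is identical to per-indicator scans.
--     for field in (author, committer, message):
--         text = str(field).lower() if field else ''
--         for i in range(len(text)):
--             for length in window_lengths:
--                 if text[i:i+length] in ai_indicators:
--                     return True
--     return False
-- ===== Notes on version B (the rewrite author's own statement) =====
-- stated objective: alternative
-- what changed: B is a sliding-window multi-pattern matcher: it walks each lowered field once and, at every position, looks the window of each distinct indicator length up in a hash set of indicators, instead of A's one 'in' substring scan per indicator per field; what is iterated (positions x window lengths vs indicators) and what is maintained (a set lookup vs repeated scans) both change.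
import Mathlib
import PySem

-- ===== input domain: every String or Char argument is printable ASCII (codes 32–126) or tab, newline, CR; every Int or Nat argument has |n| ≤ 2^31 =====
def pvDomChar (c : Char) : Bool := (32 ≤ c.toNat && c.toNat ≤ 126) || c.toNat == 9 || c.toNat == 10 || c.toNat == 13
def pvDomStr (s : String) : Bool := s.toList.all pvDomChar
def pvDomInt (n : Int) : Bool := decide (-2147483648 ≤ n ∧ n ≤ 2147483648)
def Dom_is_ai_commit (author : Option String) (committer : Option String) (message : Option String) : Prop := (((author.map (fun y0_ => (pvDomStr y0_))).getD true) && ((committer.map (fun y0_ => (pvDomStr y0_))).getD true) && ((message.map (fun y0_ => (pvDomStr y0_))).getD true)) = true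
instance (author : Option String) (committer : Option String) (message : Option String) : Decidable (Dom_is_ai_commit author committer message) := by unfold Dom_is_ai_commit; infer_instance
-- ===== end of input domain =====

-- B replaces A's per-indicator substring scans by a sliding-window pass over each field, looking each window up in the indicator set (alternative algorithm, similar cost).


-- ===== PORT A =====
def aiIndicatorsA : List String :=
  ["bot", "ai", "copilot", "assistant", "github-actions",
   "dependabot", "renovate", "automated", "auto-"]

-- str(x).lower() if x else ''  (falsy: None or the empty string)
def lowerFalsyA (o : Option String) : String :=
  match o with
  | none => ""
  | some s => if s = "" then "" else PySem.Str.lower s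

-- the 'for indicator in ai_indicators: if … return True' loop
def aiLoopA (al cl ml : String) : List String → Bool
  | [] => false
  | ind :: rest =>
    if PySem.Str.isIn ind al || PySem.Str.isIn ind cl || PySem.Str.isIn ind ml then
      true
    else
      aiLoopA al cl ml rest

def is_ai_commit (author : Option String) (committer : Option String) (message : Option String) : Bool :=
  aiLoopA (lowerFalsyA author) (lowerFalsyA committer) (lowerFalsyA message) aiIndicatorsA

-- ===== PORT B =====
-- the Python set literal of indicators
def aiIndicatorsB : PySem.Set String :=
  PySem.Set.ofList
    ["bot", "ai", "copilot", "assistant", "github-actions",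
     "dependabot", "renovate", "automated", "auto-"]

-- window_lengths = sorted({len(ind) for ind in ai_indicators})
def windowLengthsB : List Int :=
  PySem.List.sorted (PySem.Set.ofList (aiIndicatorsB.map (fun ind => PySem.Str.len ind)))
    (fun x => x) false

def lowerFalsyB (o : Option String) : String :=
  match o with
  | none => ""
  | some s => if s = "" then "" else PySem.Str.lower s

-- 'for i in range(len(text)): for length in window_lengths: if text[i:i+length] in ai_indicators: return True'
def scanTextB (text : String) : Bool :=
  (PySem.List.pyRange 0 (PySem.Str.len text) 1).any (fun i =>
    windowLengthsB.any (fun length =>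
      PySem.Set.contains aiIndicatorsB (PySem.Str.slice text (some i) (some (i + length)))))

-- the outer 'for field in (author, committer, message)' loop with its early return
def scanFieldsB : List (Option String) → Bool
  | [] => false
  | f :: rest => if scanTextB (lowerFalsyB f) then true else scanFieldsB rest

def is_ai_commit_alt (author : Option String) (committer : Option String) (message : Option String) : Bool :=
  scanFieldsB [author, committer, message]

-- ===== PRECONDITION & SPEC =====
def Spec_is_ai_commit (author : Option String) (committer : Option String) (message : Option String) (out : Bool) : Prop := out = is_ai_commit_alt author committer message
instance (author : Option String) (committer : Option String) (message : Option String) (out : Bool) : Decidable (Spec_is_ai_commit author committer message out) := by unfold Spec_is_ai_commit; infer_instance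

-- ===== CLAIM (what is proved, stated in full; the proofs are below) =====
def Claim_equal_is_ai_commit : Prop := ∀ (author : Option String) (committer : Option String) (message : Option String), Dom_is_ai_commit author committer message → Spec_is_ai_commit author committer message (is_ai_commit author committer message)

-- ===== LEMMAS AND PROOFS =====

-- A's early-return loop is an 'any' over the indicators
theorem aiLoopA_eq_any (al cl ml : String) (L : List String) :
    aiLoopA al cl ml L
      = L.any (fun p => PySem.Str.isIn p al || PySem.Str.isIn p cl || PySem.Str.isIn p ml) := by
  induction L with
  | nil => rfl
  | cons ind rest ih =>
    rw [List.any_cons, ← ih]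
    cases h : (PySem.Str.isIn ind al || PySem.Str.isIn ind cl || PySem.Str.isIn ind ml) with
    | true => simp only [aiLoopA, h, if_true, Bool.true_or]
    | false => simp only [aiLoopA, h, Bool.false_eq_true, if_false, Bool.false_or]

-- every distinct indicator length is in window_lengths, indicators are nonempty,
-- and every window length is nonnegative (all closed computations)
theorem aiLen_mem_lengths : ∀ p ∈ aiIndicatorsB, PySem.Str.len p ∈ windowLengthsB := by decide
theorem aiInd_ne_nil : ∀ p ∈ aiIndicatorsB, p.toList ≠ [] := by decide
theorem aiLen_nonneg : ∀ L ∈ windowLengthsB, 0 ≤ L := by decide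

-- B's per-field window scan hits iff some indicator is a substring of the field
theorem scanTextB_iff (t : String) :
    scanTextB t = true ↔ ∃ p ∈ aiIndicatorsB, PySem.Str.isIn p t = true := by
  unfold scanTextB
  rw [List.any_eq_true]
  constructor
  · rintro ⟨i, hi, hinner⟩
    rw [List.any_eq_true] at hinner
    obtain ⟨L, hL, hc⟩ := hinner
    rw [PySem.List.mem_pyRange_one] at hi
    have h0i : 0 ≤ i := hi.1
    have h0L : 0 ≤ L := aiLen_nonneg L hL
    set w := PySem.Str.slice t (some i) (some (i + L)) with hw
    have hwmem : w ∈ aiIndicatorsB := by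
      simpa [PySem.Set.contains, List.contains_iff_mem] using hc
    refine ⟨w, hwmem, ?_⟩
    rw [PySem.Str.isIn_iff_infix, hw, PySem.Str.toList_slice,
        PySem.Chars.slice_eq_listSlice,
        PySem.List.slice_toNat t.toList h0i (by omega)]
    exact (List.take_prefix _ _).isInfix.trans (List.drop_suffix _ _).isInfix
  · rintro ⟨p, hp, hin⟩
    rw [PySem.Str.isIn_iff_infix] at hin
    obtain ⟨s1, s2, hsplit⟩ := hin
    have hpn : p.toList ≠ [] := aiInd_ne_nil p hp
    have hlen : t.toList.length = s1.length + p.toList.length + s2.length := by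
      rw [← hsplit]; simp [List.length_append]; omega
    refine ⟨(s1.length : Int), ?_, ?_⟩
    · rw [PySem.List.mem_pyRange_one, PySem.Str.len_eq]
      have : 1 ≤ p.toList.length := List.length_pos_iff.mpr hpn
      constructor
      · positivity
      · exact_mod_cast (by omega : s1.length < t.toList.length)
    · rw [List.any_eq_true]
      refine ⟨PySem.Str.len p, aiLen_mem_lengths p hp, ?_⟩
      have hslice : PySem.Str.slice t (some (s1.length : Int))
          (some ((s1.length : Int) + PySem.Str.len p)) = p := by
        apply String.toList_injective
        rw [PySem.Str.toList_slice, PySem.Chars.slice_eq_listSlice, PySem.Str.len_eq,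
            PySem.List.slice_natCast_add, ← hsplit]
        rw [List.append_assoc, List.drop_left, List.take_left]
      rw [hslice]
      simpa [PySem.Set.contains, List.contains_iff_mem] using hp

-- the two literal indicator containers hold the same strings in the same order
theorem aiIndA_eq_B : aiIndicatorsA = aiIndicatorsB := by decide

-- the outer field loop with early return is a three-way OR of the field scans
theorem scanFieldsB_three (a c m : Option String) :
    scanFieldsB [a, c, m]
      = (scanTextB (lowerFalsyB a) || scanTextB (lowerFalsyB c) || scanTextB (lowerFalsyB m)) := by
  simp only [scanFieldsB]
  cases scanTextB (lowerFalsyB a) <;> cases scanTextB (lowerFalsyB c) <;>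
    cases scanTextB (lowerFalsyB m) <;> simp

-- ===== VERDICT (by name: the statement is the Claim_ definition above) =====
set_option maxHeartbeats 1000000 in
theorem is_ai_commit_spec : Claim_equal_is_ai_commit := by
  intro author committer message _
  unfold Spec_is_ai_commit is_ai_commit is_ai_commit_alt
  rw [show lowerFalsyA = lowerFalsyB from rfl, aiLoopA_eq_any, aiIndA_eq_B,
      scanFieldsB_three, Bool.eq_iff_iff]
  simp only [List.any_eq_true, Bool.or_eq_true, scanTextB_iff]
  constructor
  · rintro ⟨p, hp, (h | h) | h⟩
    · exact Or.inl (Or.inl ⟨p, hp, h⟩)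
    · exact Or.inl (Or.inr ⟨p, hp, h⟩)
    · exact Or.inr ⟨p, hp, h⟩
  · rintro ((⟨p, hp, h⟩ | ⟨p, hp, h⟩) | ⟨p, hp, h⟩)
    · exact ⟨p, hp, Or.inl (Or.inl h)⟩
    · exact ⟨p, hp, Or.inl (Or.inr h)⟩
    · exact ⟨p, hp, Or.inr h⟩
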